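-- pv_equiv track=rewrite | github.com/SHANU1800/RADIOTHERAPY_ML_PROJECT | src/load_data.py | _parse_header_semicolon
-- ===== SOURCE A (Python) =====
-- from typing import Dict, List, Optional, Tuple, Union
--
-- def _parse_header_semicolon(lines: List[str]) -> Tuple[Dict[str, str], int]:
--     """Parse header until HeaderEnd; return (meta dict, index of first data line)."""
--     meta: Dict[str, str] = {}
--     for i, line in enumerate(lines):
--         stripped = line.strip()
--         if stripped == "HeaderEnd":
--             return meta, i + 1
--         if ":" in stripped and not stripped.startswith("["):
--             key, value = stripped.split(":", 1)
--             meta[key.strip()] = value.strip()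
--     return meta, len(lines)
-- ===== SOURCE B (Python) =====
-- from typing import Dict, List, Tuple
--
-- def _parse_header_semicolon(lines: List[str]) -> Tuple[Dict[str, str], int]:
--     """Two-pass: locate the HeaderEnd boundary first, then build meta by comprehension."""
--     boundary = next((i for i, l in enumerate(lines) if l.strip() == "HeaderEnd"), None)
--     if boundary is None:
--         cut, end = len(lines), len(lines)
--     else:
--         cut, end = boundary, boundary + 1
--     head = [l.strip() for l in lines[:cut]]
--     meta = {s.split(":", 1)[0].strip(): s.split(":", 1)[1].strip()
--             for s in head if ":" in s and not s.startswith("[")}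
--     return meta, end
-- ===== Notes on version B (the rewrite author's own statement) =====
-- stated objective: alternative
-- what changed: A interleaves marker detection and meta collection in one early-return loop; B first locates the HeaderEnd boundary, then builds meta with a dict comprehension over the stripped prefix lines[:boundary].
import Mathlib
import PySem

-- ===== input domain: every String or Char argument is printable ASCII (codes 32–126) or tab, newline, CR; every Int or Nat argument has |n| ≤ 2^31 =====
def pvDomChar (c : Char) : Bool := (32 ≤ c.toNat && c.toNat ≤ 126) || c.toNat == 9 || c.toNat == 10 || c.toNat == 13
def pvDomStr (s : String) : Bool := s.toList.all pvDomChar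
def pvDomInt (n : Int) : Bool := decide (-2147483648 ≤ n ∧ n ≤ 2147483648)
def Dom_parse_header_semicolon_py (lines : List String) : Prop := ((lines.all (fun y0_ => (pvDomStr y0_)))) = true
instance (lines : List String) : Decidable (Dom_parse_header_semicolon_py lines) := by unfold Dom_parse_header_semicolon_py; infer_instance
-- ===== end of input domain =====

-- B is a different decomposition: it finds the HeaderEnd boundary first, then builds acc
-- in a second pass over the prefix; the proof shows A's single early-return loop agrees.

-- ===== PORT A =====
-- single pass with enumerate index and early return, as in A
def pvLoopA (rest : List String) (i : Nat) (acc : PySem.Dict String String) :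
    (List (String × String)) × Int :=
  match rest with
  | [] => (acc.items, (i : Int))
  | line :: rest' =>
    let stripped := PySem.Str.strip line
    if stripped == "HeaderEnd" then (acc.items, (i : Int) + 1)
    else if PySem.Str.isIn ":" stripped && !(PySem.Str.startswith stripped "[") then
      match PySem.Str.splitMax? stripped ":" 1 with
      | some (key :: value :: _) =>
          pvLoopA rest' (i + 1) (acc.insert (PySem.Str.strip key) (PySem.Str.strip value))
      | _ => pvLoopA rest' (i + 1) acc   -- unreachable: ":" ∈ stripped gives two pieces
    else pvLoopA rest' (i + 1) acc

def parse_header_semicolon_py (lines : List String) : (List (String × String)) × Int :=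
  pvLoopA lines 0 PySem.Dict.empty

-- ===== PORT B =====
-- one dict-comprehension step over an already-stripped line
def pvStepB (d : PySem.Dict String String) (s : String) : PySem.Dict String String :=
  if PySem.Str.isIn ":" s && !(PySem.Str.startswith s "[") then
    match PySem.Str.splitMax? s ":" 1 with
    | some (key :: value :: _) => d.insert (PySem.Str.strip key) (PySem.Str.strip value)
    | _ => d
  else d

def parse_header_semicolon_py_alt (lines : List String) : (List (String × String)) × Int :=
  let boundary? := lines.findIdx? (fun l => PySem.Str.strip l == "HeaderEnd")
  let cut : Nat := boundary?.getD lines.length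
  let endIdx : Int := match boundary? with
    | some b => (b : Int) + 1
    | none => (lines.length : Int)
  let head := (lines.take cut).map PySem.Str.strip
  ((head.foldl pvStepB PySem.Dict.empty).items, endIdx)

-- ===== PRECONDITION & SPEC =====
def Spec_parse_header_semicolon_py (lines : List String) (out : (List (String × String)) × Int) : Prop := out = parse_header_semicolon_py_alt lines
instance (lines : List String) (out : (List (String × String)) × Int) : Decidable (Spec_parse_header_semicolon_py lines out) := by unfold Spec_parse_header_semicolon_py; infer_instance

-- ===== CLAIM (what is proved, stated in full; the proofs are below) =====
def Claim_equal_parse_header_semicolon_py : Prop := ∀ (lines : List String), Dom_parse_header_semicolon_py lines → Spec_parse_header_semicolon_py lines (parse_header_semicolon_py lines)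

-- ===== LEMMAS AND PROOFS =====

-- one step of A's loop is B's per-line step on the stripped line
theorem pvLoopA_cons (line : String) (rest' : List String) (i : Nat)
    (acc : PySem.Dict String String) :
    pvLoopA (line :: rest') i acc =
      if PySem.Str.strip line == "HeaderEnd" then (acc.items, (i : Int) + 1)
      else pvLoopA rest' (i + 1) (pvStepB acc (PySem.Str.strip line)) := by
  simp only [pvLoopA, pvStepB]
  split_ifs with h1 h2
  · rfl
  · split <;> rfl
  · rfl

-- A's loop from any state equals B's boundary-then-fold decomposition of the remaining lines
theorem pvLoopA_eq (rest : List String) : ∀ (i : Nat) (acc : PySem.Dict String String),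
    pvLoopA rest i acc =
      ((((rest.take ((rest.findIdx? (fun l => PySem.Str.strip l == "HeaderEnd")).getD rest.length)).map PySem.Str.strip).foldl pvStepB acc).items,
       match rest.findIdx? (fun l => PySem.Str.strip l == "HeaderEnd") with
       | some b => (i : Int) + (b : Int) + 1
       | none => (i : Int) + (rest.length : Int)) := by
  induction rest with
  | nil => intro i acc; simp [pvLoopA]
  | cons line rest' ih =>
    intro i acc
    rw [pvLoopA_cons]
    by_cases h : PySem.Str.strip line == "HeaderEnd"
    · simp only [h, if_true, List.findIdx?_cons, Option.getD_some, List.take_zero,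
        List.map_nil, List.foldl_nil]
      rfl
    · rw [if_neg (by simp [h]), ih]
      simp only [List.findIdx?_cons, h, Bool.false_eq_true, if_false]
      cases hfi : rest'.findIdx? (fun l => PySem.Str.strip l == "HeaderEnd") with
      | some b =>
        simp only [Option.map_some, Option.getD_some, List.take_succ_cons,
          List.map_cons, List.foldl_cons]
        refine Prod.ext rfl ?_
        push_cast; ring
      | none =>
        simp only [Option.map_none, Option.getD_none, List.length_cons,
          List.take_succ_cons, List.map_cons, List.foldl_cons, List.take_length]
        refine Prod.ext rfl ?_
        push_cast; ring

-- ===== VERDICT (by name: the statement is the Claim_ definition above) =====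
theorem parse_header_semicolon_py_spec : Claim_equal_parse_header_semicolon_py := by
  intro lines _
  unfold Spec_parse_header_semicolon_py parse_header_semicolon_py parse_header_semicolon_py_alt
  rw [pvLoopA_eq]
  cases hfi : lines.findIdx? (fun l => PySem.Str.strip l == "HeaderEnd") <;> simp_all
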